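-- pv_equiv track=rewrite | github.com/JakaGubanc/Stolen_necklace_problem | ogrlicaGUI.py | postena_delitev
-- ===== SOURCE A (Python) =====
-- def razdelitev_na_k_delov(s,m):
--     if len(s)==m:
--         return [[[i] for i in s]]
--     if m == 1:
--         return [[s]]
--     else:
--         razdelitve = []
--         for i in range (1,len(s)-m+2):
--             for j in razdelitev_na_k_delov(s[i:],m-1):
--                 temp = j[::-1]+[s[:i]]
--                 razdelitve = razdelitve + [temp[::-1]]
--         return razdelitve
--
-- def je_postena(delitev, znaki):
--     presteto = dict()
--     for i in znaki:
--         presteto[i] = [0,0]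
--     for i in range(len(delitev)):
--         for j in delitev[i]:
--             if i%2 == 0:
--                 presteto[j][0] += 1
--             else:
--                 presteto[j][1] += 1
--     for i in presteto:
--         if presteto[i][0] != presteto[i][1]:
--             return False
--
--     return True
--
-- def postena_delitev(s):
--     postene=[]
--     znaki = set()
--     for i in s:
--         znaki.add(i)
--     k = len(znaki)
--     for delitev in razdelitev_na_k_delov(s,k+1):
--         if je_postena(delitev, znaki):
--             #return delitev
--             postene.append(delitev)
--     return postene
-- ===== SOURCE B (Python) =====
-- def postena_delitev(s):
--     # DFS over cut positions carrying an incrementally updated per-value signed imbalance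
--     # (values in even-indexed parts count +sign, odd-indexed parts -sign); a branch is pruned
--     # as soon as some value's imbalance can no longer be cancelled by its remaining occurrences.
--     m = len(set(s)) + 1
--     res = []
--
--     def dfs(rest, rem, sign, parts, diff):
--         # prune: each occurrence of v in rest changes v's imbalance by exactly +-1,
--         # so a fair completion needs |diff[v]| <= count and matching parity, for every v
--         cnt = {}
--         for v in rest:
--             cnt[v] = cnt.get(v, 0) + 1
--         keys = set(diff)
--         keys.update(cnt)
--         for v in keys:
--             d = diff.get(v, 0)
--             c = cnt.get(v, 0)
--             if abs(d) > c or (d + c) % 2 != 0: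
--                 return
--         if rem == 1:
--             d2 = dict(diff)
--             for v in rest:
--                 d2[v] = d2.get(v, 0) + sign
--             if all(x == 0 for x in d2.values()):
--                 res.append(parts + [rest])
--             return
--         for i in range(1, len(rest) - rem + 2):
--             part = rest[:i]
--             d2 = dict(diff)
--             for v in part:
--                 d2[v] = d2.get(v, 0) + sign
--             dfs(rest[i:], rem - 1, -sign, parts + [part], d2)
--
--     dfs(s, m, 1, [], {})
--     return res
-- ===== Notes on version B (the rewrite author's own statement) =====
-- stated objective: alternative
-- what changed: Instead of materialising every partition via recursive quadratic list concatenation (razdelitve = razdelitve + [temp], with double reversals) and then recounting each candidate from scratch in a fresh dict, B does a single DFS over cut positions that carries the parts built so far and an incrementally updated per-value signed imbalance (even-indexed parts +sign, odd-indexed parts -sign), prunes a branch as soon as some value's imbalance exceeds its remaining occurrences or has the wrong parity, and emits a partition exactly when all imbalances are zero.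
import Mathlib
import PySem

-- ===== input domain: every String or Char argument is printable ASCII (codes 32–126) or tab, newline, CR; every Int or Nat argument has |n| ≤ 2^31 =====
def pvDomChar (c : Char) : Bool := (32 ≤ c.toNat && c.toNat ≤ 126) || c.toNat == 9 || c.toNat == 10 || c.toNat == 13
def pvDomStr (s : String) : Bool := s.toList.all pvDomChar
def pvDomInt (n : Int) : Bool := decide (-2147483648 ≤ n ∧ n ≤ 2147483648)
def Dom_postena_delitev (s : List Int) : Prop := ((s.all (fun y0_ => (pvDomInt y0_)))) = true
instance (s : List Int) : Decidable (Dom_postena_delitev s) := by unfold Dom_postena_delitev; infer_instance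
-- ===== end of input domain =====

-- B changes the algorithm: instead of materialising every partition (with quadratic list
-- concatenation) and recounting each from scratch, it DFS-generates parts while carrying a
-- running signed imbalance per value and prunes branches no fair split can complete.
-- Equality of the return values is proved.

-- ===== PORT A =====
-- razdelitev_na_k_delov(s, m); m is Nat here (A only calls it with m = k+1 ≥ 1;
-- for m = 0 and s ≠ [] the Python diverges, so the m = 0 branch below is unreachable from postena_delitev)
def razdA (s : List Int) (m : Nat) : List (List (List Int)) :=
  if s.length = m then [s.map (fun i => [i])]
  else
    match m with
    | 0 => [[s]]
    | 1 => [[s]]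
    | (m' + 2) =>
      (PySem.List.pyRange 1 ((s.length : Int) - (m' + 2) + 2)).foldl
        (fun razdelitve i =>
          (razdA (PySem.List.slice s (some i) none) (m' + 1)).foldl
            (fun razdelitve j =>
              razdelitve ++ [(j.reverse ++ [PySem.List.slice s none (some i)]).reverse])
            razdelitve)
        []
termination_by m

-- je_postena(delitev, znaki).  presteto[j][0/1] += 1 is ported as Dict.modify with default
-- (0,0); the default is never used in A's calls (every j occurring in delitev is a key).
def jePostena (delitev : List (List Int)) (znaki : PySem.Set Int) : Bool :=
  let presteto : PySem.Dict Int (Int × Int) :=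
    znaki.foldl (fun d i => d.insert i ((0 : Int), (0 : Int))) PySem.Dict.empty
  let presteto :=
    (PySem.List.pyRange 0 (PySem.List.len delitev)).foldl
      (fun d i =>
        (PySem.List.pyGetD delitev i ([] : List Int)).foldl
          (fun d j =>
            if PySem.Int.mod i 2 = 0 then d.modify j ((0 : Int), (0 : Int)) (fun p => (p.1 + 1, p.2))
            else d.modify j ((0 : Int), (0 : Int)) (fun p => (p.1, p.2 + 1)))
          d)
      presteto
  presteto.items.all (fun p => p.2.1 == p.2.2)

def postena_delitev (s : List Int) : List (List (List Int)) :=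
  let znaki : PySem.Set Int := s.foldl (fun z i => PySem.Set.add z i) PySem.Set.empty
  let k := znaki.length
  (razdA s (k + 1)).foldl
    (fun postene delitev => if jePostena delitev znaki then postene ++ [delitev] else postene)
    []

-- ===== PORT B =====
-- d[v] = d.get(v, 0) + sign  over all v in vs
def addAll (diff : PySem.Dict Int Int) (sign : Int) (vs : List Int) : PySem.Dict Int Int :=
  vs.foldl (fun d v => d.insert v (d.getD v 0 + sign)) diff

-- dfs(rest, rem, sign, parts, diff); rem is Nat (B only calls it with rem = m ≥ 1, so rem = 0 is unreachable)
def dfsB (rest : List Int) (rem : Nat) (sign : Int) (parts : List (List Int))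
    (diff : PySem.Dict Int Int) : List (List (List Int)) :=
  let cnt := rest.foldl (fun d v => d.insert v (d.getD v 0 + 1)) PySem.Dict.empty
  let keys := PySem.Set.update (PySem.Set.ofList diff.keys) cnt.keys
  if keys.all (fun v =>
      decide (|diff.getD v 0| ≤ cnt.getD v 0) &&
      decide (PySem.Int.mod (diff.getD v 0 + cnt.getD v 0) 2 = 0)) then
    match rem with
    | 0 => []
    | 1 =>
      let d := addAll diff sign rest
      if d.values.all (fun x => x == 0) then [parts ++ [rest]] else []
    | (r + 2) =>
      (PySem.List.pyRange 1 ((rest.length : Int) - (r + 2) + 2)).foldl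
        (fun out i =>
          let part := PySem.List.slice rest none (some i)
          let d := addAll diff sign part
          out ++ dfsB (PySem.List.slice rest (some i) none) (r + 1) (-sign) (parts ++ [part]) d)
        []
  else []
termination_by rem

def postena_delitev_alt (s : List Int) : List (List (List Int)) :=
  let m := (PySem.Set.ofList s).length + 1
  dfsB s m 1 [] PySem.Dict.empty

-- ===== PRECONDITION & SPEC =====
def Spec_postena_delitev (s : List Int) (out : List (List (List Int))) : Prop := out = postena_delitev_alt s
instance (s : List Int) (out : List (List (List Int))) : Decidable (Spec_postena_delitev s out) := by unfold Spec_postena_delitev; infer_instance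

-- ===== CLAIM (what is proved, stated in full; the proofs are below) =====
def Claim_equal_postena_delitev : Prop := ∀ (s : List Int), Dom_postena_delitev s → Spec_postena_delitev s (postena_delitev s)

-- ===== LEMMAS AND PROOFS =====

def comps : List Int → Nat → List (List (List Int))
  | _, 0 => []
  | s, 1 => [[s]]
  | s, (m + 2) =>
    (List.range (s.length - (m + 1))).flatMap
      (fun k => (comps (s.drop (k + 1)) (m + 1)).map (fun c => s.take (k + 1) :: c))

def cnt2 : List (List Int) → Int → Int × Int
  | [], _ => (0, 0)
  | p :: ps, x => ((p.count x : Int) + (cnt2 ps x).2, (cnt2 ps x).1)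

def dv : List (List Int) → Int → Int
  | [], _ => 0
  | p :: ps, x => (p.count x : Int) - dv ps x

def pushAll (d : PySem.Dict Int Int) (sg : Int) : List (List Int) → PySem.Dict Int Int
  | [] => d
  | p :: ps => pushAll (addAll d sg p) (-sg) ps

lemma comps_singles : ∀ (m : Nat) (s : List Int), 1 ≤ m → s.length = m →
    comps s m = [s.map (fun i => [i])] := by
  intro m
  induction m with
  | zero => omega
  | succ m ih =>
    intro s _ hlen
    match m with
    | 0 =>
      match s, hlen with
      | [x], _ => rfl
    | m + 1 =>
      show comps s (m + 2) = _
      simp only [comps]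
      have h1 : s.length - (m + 1) = 1 := by omega
      rw [h1]
      match s, hlen with
      | x :: t, hlen =>
        have ht : t.length = m + 1 := by simpa using hlen
        simp [ih t (by omega) ht]

lemma comps_flatten : ∀ (m : Nat) (s : List Int) (c : List (List Int)),
    c ∈ comps s m → c.flatten = s := by
  intro m
  induction m with
  | zero => intro s c h; simp [comps] at h
  | succ m ih =>
    intro s c h
    match m with
    | 0 => simp [comps] at h; simp [h]
    | m + 1 =>
      simp only [comps, List.mem_flatMap, List.mem_map, List.mem_range] at h
      obtain ⟨k, _, c', hc', rfl⟩ := h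
      simp [ih _ _ hc']

lemma addAll_getD (vs : List Int) : ∀ (d : PySem.Dict Int Int) (sg x : Int),
    (addAll d sg vs).getD x 0 = d.getD x 0 + sg * vs.count x := by
  induction vs with
  | nil => intro d sg x; simp [addAll]
  | cons v vs ih =>
    intro d sg x
    simp only [addAll, List.foldl_cons] at *
    rw [ih, PySem.Dict.getD_insert]
    by_cases hx : x = v
    · simp [hx]; ring
    · simp only [hx, if_false, List.count_cons]
      have : (v == x) = false := by simp [Ne.symm hx]
      simp [this]

lemma addAll_keys (vs : List Int) (d : PySem.Dict Int Int) (sg : Int) :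
    (addAll d sg vs).keys = PySem.Set.update d.keys vs :=
  PySem.Dict.keys_foldl_insert vs (fun d v => d.getD v 0 + sg) d

lemma pushAll_getD (c : List (List Int)) : ∀ (d : PySem.Dict Int Int) (sg x : Int),
    (pushAll d sg c).getD x 0 = d.getD x 0 + sg * dv c x := by
  induction c with
  | nil => intro d sg x; simp [pushAll, dv]
  | cons p ps ih =>
    intro d sg x
    simp only [pushAll, dv]
    rw [ih, addAll_getD]
    ring

lemma pushAll_keys (c : List (List Int)) : ∀ (d : PySem.Dict Int Int) (sg : Int),
    (pushAll d sg c).keys = PySem.Set.update d.keys c.flatten := by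
  induction c with
  | nil => intro d sg; simp [pushAll, PySem.Set.update]
  | cons p ps ih =>
    intro d sg
    simp only [pushAll, List.flatten_cons]
    rw [ih, addAll_keys, PySem.Set.update, PySem.Set.update, PySem.Set.update, List.foldl_append]

lemma range_shift_helper (n m' : Nat) :
    ((n : Int) - (m' + 2) + 2 - 1).toNat = n - (m' + 1) := by omega

lemma razdA_eq_comps : ∀ (m : Nat), 1 ≤ m → ∀ s, razdA s m = comps s m := by
  intro m
  induction m using Nat.strong_induction_on with
  | _ m ih =>
    intro hm s
    by_cases hlen : s.length = m
    · rw [comps_singles m s hm hlen, razdA.eq_def, if_pos hlen]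
    · match m, hm with
      | 1, _ =>
        rw [razdA.eq_def, if_neg hlen]; rfl
      | (m' + 2), _ =>
        rw [razdA.eq_def, if_neg hlen]
        simp only [List.reverse_append, List.reverse_cons, List.reverse_nil, List.nil_append,
          List.reverse_reverse, List.cons_append, PySem.List.foldl_append_singleton_eq_map,
          PySem.List.foldl_append_eq_flatMap]
        show List.flatMap _ _ = comps s (m' + 2)
        simp only [comps, PySem.List.pyRange_one, List.flatMap_map]
        rw [range_shift_helper s.length m']
        apply List.flatMap_congr
        intro k _
        have h1 : (1 : Int) + k = ((k + 1 : Nat) : Int) := by push_cast; ring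
        rw [h1, PySem.List.slice_from_natCast, PySem.List.slice_to_natCast,
          ih (m' + 1) (by omega) (by omega)]

lemma dv_natAbs_le (c : List (List Int)) (x : Int) :
    (dv c x).natAbs ≤ c.flatten.count x := by
  induction c with
  | nil => simp [dv]
  | cons p ps ih =>
    simp only [dv, List.flatten_cons, List.count_append]
    omega

lemma dv_parity (c : List (List Int)) (x : Int) :
    (dv c x + (c.flatten.count x : Int)) % 2 = 0 := by
  induction c with
  | nil => simp [dv]
  | cons p ps ih =>
    simp only [dv, List.flatten_cons, List.count_append]
    push_cast
    omega

lemma addAll_nodup (vs : List Int) (d : PySem.Dict Int Int) (sg : Int) (h : d.keys.Nodup) :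
    (addAll d sg vs).keys.Nodup :=
  PySem.Dict.nodup_keys_foldl_insert vs (fun d v => d.getD v 0 + sg) d h

lemma pushAll_nodup (c : List (List Int)) : ∀ (d : PySem.Dict Int Int) (sg : Int),
    d.keys.Nodup → (pushAll d sg c).keys.Nodup := by
  induction c with
  | nil => intro d sg h; exact h
  | cons p ps ih => intro d sg h; exact ih _ _ (addAll_nodup p d sg h)

-- if the prune condition fails at (rest, diff, sign), no composition of rest can be fair
lemma prune_sound (rest : List Int) (diff : PySem.Dict Int Int) (sign : Int)
    (hsign : sign = 1 ∨ sign = -1) (hnodup : diff.keys.Nodup)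
    (hP : ¬ (PySem.Set.update (PySem.Set.ofList diff.keys) (PySem.Dict.counter rest).keys).all
      (fun v =>
        decide (|diff.getD v 0| ≤ (PySem.Dict.counter rest).getD v 0) &&
        decide (PySem.Int.mod (diff.getD v 0 + (PySem.Dict.counter rest).getD v 0) 2 = 0)) = true)
    (c : List (List Int)) (hflat : c.flatten = rest) :
    (pushAll diff sign c).values.all (fun x => x == 0) = false := by
  rw [Bool.not_eq_true, List.all_eq_false] at hP
  obtain ⟨v, hvmem, hvbad⟩ := hP
  simp only [PySem.Dict.getD_counter, Bool.not_eq_true, Bool.and_eq_false_iff,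
    decide_eq_false_iff_not] at hvbad
  have hvk : v ∈ (pushAll diff sign c).keys := by
    rw [pushAll_keys, hflat, PySem.Set.mem_update]
    rw [PySem.Set.mem_update, PySem.Set.mem_ofList] at hvmem
    rcases hvmem with hl | hr
    · exact Or.inl hl
    · right; rw [PySem.Dict.keys_counter, PySem.Set.mem_ofList] at hr; exact hr
  have hnd : (pushAll diff sign c).keys.Nodup := pushAll_nodup c diff sign hnodup
  have hval : (pushAll diff sign c).getD v 0 = diff.getD v 0 + sign * dv c v :=
    pushAll_getD c diff sign v
  have hb : (dv c v).natAbs ≤ rest.count v := by rw [← hflat]; exact dv_natAbs_le c v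
  have hpar : (dv c v + (rest.count v : Int)) % 2 = 0 := by
    rw [← hflat]; exact dv_parity c v
  have hne : (pushAll diff sign c).getD v 0 ≠ 0 := by
    rw [hval]
    rw [Int.abs_eq_natAbs, PySem.Int.mod_eq_emod_of_pos (by norm_num)] at hvbad
    rcases hsign with rfl | rfl <;> rcases hvbad with hb2 | hb2 <;> omega
  rw [List.all_eq_false]
  refine ⟨(pushAll diff sign c).getD v 0, ?_, by simp [hne]⟩
  rw [PySem.Dict.values_eq_map_keys _ hnd (0 : Int)]
  exact List.mem_map.2 ⟨v, hvk, rfl⟩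

lemma dfsB_eq : ∀ (rem : Nat), 1 ≤ rem → ∀ (rest : List Int) (sign : Int)
    (parts : List (List Int)) (diff : PySem.Dict Int Int),
    (sign = 1 ∨ sign = -1) → diff.keys.Nodup →
    dfsB rest rem sign parts diff =
      ((comps rest rem).filter
        (fun c => (pushAll diff sign c).values.all (fun x => x == 0))).map
        (fun c => parts ++ c) := by
  intro rem
  induction rem using Nat.strong_induction_on with
  | _ rem ih =>
    intro hrem rest sign parts diff hsign hnodup
    rw [dfsB.eq_def]
    simp only [PySem.Dict.foldl_insert_getD_add_one_eq_counter]
    split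
    case isTrue hP =>
      match rem, hrem with
      | 1, _ =>
        have hp : pushAll diff sign [rest] = addAll diff sign rest := rfl
        simp only [comps, List.filter, hp]
        cases hA : (addAll diff sign rest).values.all (fun x => x == 0) <;> simp
      | (r + 2), _ =>
        simp only [PySem.List.foldl_append_eq_flatMap, List.nil_append]
        simp only [comps, List.filter_flatMap, List.map_flatMap, PySem.List.pyRange_one,
          List.flatMap_map]
        have hr : ((rest.length : Int) - (r + 2) + 2 - 1).toNat = rest.length - (r + 1) := by omega
        rw [hr]
        apply List.flatMap_congr
        intro k _
        have h1 : (1 : Int) + k = ((k + 1 : Nat) : Int) := by push_cast; ring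
        have hsign' : -sign = 1 ∨ -sign = -1 := by rcases hsign with rfl | rfl <;> simp
        rw [h1, PySem.List.slice_from_natCast, PySem.List.slice_to_natCast,
          ih (r + 1) (by omega) (by omega) _ _ _ _ hsign'
            (addAll_nodup _ diff sign hnodup)]
        rw [List.filter_map, List.map_map]
        congr 1
        funext c
        simp [Function.comp]
    case isFalse hP =>
      symm
      rw [List.map_eq_nil_iff, List.filter_eq_nil_iff]
      intro c hc
      rw [Bool.not_eq_true]
      exact prune_sound rest diff sign hsign hnodup hP c (comps_flatten rem rest c hc)

lemma cnt2_append (c : List (List Int)) (p : List Int) (x : Int) :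
    cnt2 (c ++ [p]) x
      = cnt2 c x + (if c.length % 2 = 0 then ((p.count x : Int), 0) else (0, (p.count x : Int))) := by
  induction c with
  | nil => simp [cnt2]
  | cons q c ih =>
    simp only [List.cons_append, cnt2, ih, List.length_cons]
    by_cases hpar : c.length % 2 = 0
    · have : ¬ (c.length + 1) % 2 = 0 := by omega
      simp [hpar, this]
    · have : (c.length + 1) % 2 = 0 := by omega
      simp [hpar, this, Prod.ext_iff]; ring

lemma inner_getD (i : Int) (p : List Int) : ∀ (d : PySem.Dict Int (Int × Int)) (x : Int),
    (p.foldl (fun d j =>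
        if PySem.Int.mod i 2 = 0 then d.modify j ((0 : Int), (0 : Int)) (fun q => (q.1 + 1, q.2))
        else d.modify j ((0 : Int), (0 : Int)) (fun q => (q.1, q.2 + 1))) d).getD x (0, 0)
      = d.getD x (0, 0) + (if PySem.Int.mod i 2 = 0 then ((p.count x : Int), 0) else (0, (p.count x : Int))) := by
  by_cases hpar : PySem.Int.mod i 2 = 0
  · simp only [if_pos hpar]
    induction p with
    | nil => intro d x; simp
    | cons v p ih =>
      intro d x
      simp only [List.foldl_cons, ih, PySem.Dict.getD_modify, List.count_cons]
      by_cases hx : x = v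
      · simp [hx, Prod.ext_iff]; ring
      · have : (v == x) = false := by simp [Ne.symm hx]
        simp [hx, this]
  · simp only [if_neg hpar]
    induction p with
    | nil => intro d x; simp
    | cons v p ih =>
      intro d x
      simp only [List.foldl_cons, ih, PySem.Dict.getD_modify, List.count_cons]
      by_cases hx : x = v
      · simp [hx, Prod.ext_iff]; ring
      · have : (v == x) = false := by simp [Ne.symm hx]
        simp [hx, this]

lemma inner_keys (i : Int) (p : List Int) (d : PySem.Dict Int (Int × Int)) :
    (p.foldl (fun d j =>
        if PySem.Int.mod i 2 = 0 then d.modify j ((0 : Int), (0 : Int)) (fun q => (q.1 + 1, q.2))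
        else d.modify j ((0 : Int), (0 : Int)) (fun q => (q.1, q.2 + 1))) d).keys
      = PySem.Set.update d.keys p := by
  by_cases hpar : PySem.Int.mod i 2 = 0
  · simp only [if_pos hpar]
    exact PySem.Dict.keys_foldl_modify p ((0 : Int), (0 : Int)) (fun _ _ q => (q.1 + 1, q.2)) d
  · simp only [if_neg hpar]
    exact PySem.Dict.keys_foldl_modify p ((0 : Int), (0 : Int)) (fun _ _ q => (q.1, q.2 + 1)) d

-- the indexed counting loop of je_postena

def loopA (c : List (List Int)) (d : PySem.Dict Int (Int × Int)) : PySem.Dict Int (Int × Int) :=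
  (PySem.List.pyRange 0 ((c.length : Nat) : Int)).foldl
    (fun d i =>
      (PySem.List.pyGetD c i ([] : List Int)).foldl
        (fun d j =>
          if PySem.Int.mod i 2 = 0 then d.modify j ((0 : Int), (0 : Int)) (fun q => (q.1 + 1, q.2))
          else d.modify j ((0 : Int), (0 : Int)) (fun q => (q.1, q.2 + 1)))
        d)
    d

lemma parity_iff (n : Nat) : PySem.Int.mod (n : Int) 2 = 0 ↔ n % 2 = 0 := by
  rw [show ((2 : Int) = ((2 : Nat) : Int)) by norm_num, PySem.Int.mod_natCast]
  omega

lemma loopA_step (c : List (List Int)) (p : List Int) (d : PySem.Dict Int (Int × Int)) :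
    loopA (c ++ [p]) d =
      (PySem.List.pyGetD (c ++ [p]) (c.length : Int) ([] : List Int)).foldl
        (fun d j =>
          if PySem.Int.mod (c.length : Int) 2 = 0 then d.modify j ((0 : Int), (0 : Int)) (fun q => (q.1 + 1, q.2))
          else d.modify j ((0 : Int), (0 : Int)) (fun q => (q.1, q.2 + 1)))
        (loopA c d) := by
  unfold loopA
  have hlen : (((c ++ [p]).length : Nat) : Int) = (c.length : Int) + 1 := by
    simp [List.length_append]
  rw [hlen, PySem.List.pyRange_one_succ_right (by positivity), List.foldl_append]
  simp only [List.foldl_cons, List.foldl_nil]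
  congr 1
  apply PySem.List.foldl_congr_mem
  intro acc i hi
  rw [PySem.List.mem_pyRange_one] at hi
  obtain ⟨h0, h1⟩ := hi
  have : i = ((i.toNat : Nat) : Int) := by omega
  rw [this, PySem.List.pyGetD_natCast, PySem.List.pyGetD_natCast,
    List.getD_append _ _ _ _ (by omega)]

lemma loopA_getD (c : List (List Int)) : ∀ (d : PySem.Dict Int (Int × Int)) (x : Int),
    (loopA c d).getD x (0, 0) = d.getD x (0, 0) + cnt2 c x := by
  induction c using List.reverseRecOn with
  | nil => intro d x; simp [loopA, cnt2]
  | append_singleton c p ih =>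
    intro d x
    rw [loopA_step, inner_getD, ih, cnt2_append]
    have hp : PySem.List.pyGetD (c ++ [p]) (c.length : Int) ([] : List Int) = p := by
      rw [PySem.List.pyGetD_natCast]
      simp [List.getD]
    rw [hp]
    by_cases hpar : c.length % 2 = 0
    · simp [hpar, add_assoc]
      intro h; exfalso; omega
    · have h2 : ¬ PySem.Int.mod (c.length : Int) 2 = 0 := fun h => hpar ((parity_iff c.length).1 h)
      simp [hpar, add_assoc]
      intro h; exfalso; omega

lemma loopA_keys (c : List (List Int)) : ∀ (d : PySem.Dict Int (Int × Int)),
    (loopA c d).keys = PySem.Set.update d.keys c.flatten := by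
  induction c using List.reverseRecOn with
  | nil => intro d; simp [loopA, PySem.Set.update]
  | append_singleton c p ih =>
    intro d
    rw [loopA_step, inner_keys, ih]
    have hp : PySem.List.pyGetD (c ++ [p]) (c.length : Int) ([] : List Int) = p := by
      rw [PySem.List.pyGetD_natCast]
      simp [List.getD]
    rw [hp]
    simp [PySem.Set.update, List.foldl_append]

lemma init_getD (l : List Int) : ∀ (d : PySem.Dict Int (Int × Int)) (x : Int),
    (l.foldl (fun d i => d.insert i ((0 : Int), (0 : Int))) d).getD x (0, 0)
      = if x ∈ l then ((0 : Int), (0 : Int)) else d.getD x (0, 0) := by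
  induction l with
  | nil => intro d x; simp
  | cons v l ih =>
    intro d x
    simp only [List.foldl_cons, ih, PySem.Dict.getD_insert, List.mem_cons]
    split_ifs with h1 h2 h3 <;> simp_all

lemma init_keys (l : List Int) : ∀ (d : PySem.Dict Int (Int × Int)),
    (l.foldl (fun d i => d.insert i ((0 : Int), (0 : Int))) d).keys
      = PySem.Set.update d.keys l :=
  fun d => PySem.Dict.keys_foldl_insert l (fun _ _ => ((0 : Int), (0 : Int))) d

lemma update_of_subset : ∀ (l : List Int) (z : PySem.Set Int), (∀ x ∈ l, x ∈ z) →
    PySem.Set.update z l = z := by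
  intro l
  induction l with
  | nil => intro z _; rfl
  | cons a l ih =>
    intro z hz
    show PySem.Set.update (PySem.Set.add z a) l = z
    have : PySem.Set.add z a = z := by
      unfold PySem.Set.add
      rw [if_pos ((PySem.Set.contains_iff z a).2 (hz a (by simp)))]
    rw [this]
    exact ih z (fun x hx => hz x (by simp [hx]))

lemma cnt2_sub_eq_dv (c : List (List Int)) (x : Int) : (cnt2 c x).1 - (cnt2 c x).2 = dv c x := by
  induction c with
  | nil => simp [cnt2, dv]
  | cons p ps ih => simp only [cnt2, dv]; omega

lemma update_nil_eq_ofList (l : List Int) :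
    PySem.Set.update ([] : PySem.Set Int) l = PySem.Set.ofList l := by
  rw [PySem.Set.ofList_eq_foldl]; rfl

lemma jePostena_eq (c : List (List Int)) (s : List Int) (h : c.flatten = s) :
    jePostena c (PySem.Set.ofList s) =
      (pushAll PySem.Dict.empty 1 c).values.all (fun x => x == 0) := by
  have hself : PySem.Set.ofList (PySem.Set.ofList s) = PySem.Set.ofList s :=
    PySem.Set.ofList_eq_self_of_nodup _ (PySem.Set.nodup_ofList s)
  have hupd : PySem.Set.update (PySem.Set.ofList s) s = PySem.Set.ofList s :=
    update_of_subset s _ (fun x hx => (PySem.Set.mem_ofList s x).2 hx)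
  -- the A-side counting loop is loopA
  have hA : jePostena c (PySem.Set.ofList s)
      = (loopA c ((PySem.Set.ofList s).foldl (fun d i => d.insert i ((0:Int),(0:Int)))
          PySem.Dict.empty)).items.all (fun p => p.2.1 == p.2.2) := by
    simp only [jePostena, PySem.List.len_eq, loopA]
  set d0 : PySem.Dict Int (Int × Int) :=
    (PySem.Set.ofList s).foldl (fun d i => d.insert i ((0:Int),(0:Int))) PySem.Dict.empty with hd0
  have hkeys0 : d0.keys = PySem.Set.ofList s := by
    rw [hd0, init_keys]
    simp only [PySem.Dict.keys_empty]
    rw [update_nil_eq_ofList, hself]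
  have hkeysA : (loopA c d0).keys = PySem.Set.ofList s := by
    rw [loopA_keys, hkeys0, h, hupd]
  have hnodupA : (loopA c d0).keys.Nodup := by rw [hkeysA]; exact PySem.Set.nodup_ofList s
  have hgetA : ∀ k : Int, (loopA c d0).getD k (0, 0) = cnt2 c k := by
    intro k
    rw [loopA_getD, hd0, init_getD]
    split <;> simp [Prod.ext_iff]
  -- B side
  have hkeysB : (pushAll PySem.Dict.empty 1 c).keys = PySem.Set.ofList s := by
    rw [pushAll_keys]
    simp only [PySem.Dict.keys_empty]
    rw [update_nil_eq_ofList, h]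
  have hnodupB : (pushAll PySem.Dict.empty 1 c).keys.Nodup := by
    rw [hkeysB]; exact PySem.Set.nodup_ofList s
  have hgetB : ∀ k : Int, (pushAll PySem.Dict.empty 1 c).getD k 0 = dv c k := by
    intro k; rw [pushAll_getD]; simp
  rw [hA, PySem.Dict.items_eq_map_keys _ hnodupA ((0 : Int), (0 : Int)),
    PySem.Dict.values_eq_map_keys _ hnodupB (0 : Int), hkeysA, hkeysB,
    List.all_map, List.all_map]
  apply List.all_congr rfl
  intro k
  have hs := cnt2_sub_eq_dv c k
  simp only [Function.comp, hgetA k, hgetB k]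
  rw [Bool.eq_iff_iff]
  simp only [beq_iff_eq]
  omega

-- ===== VERDICT (by name: the statement is the Claim_ definition above) =====
theorem postena_delitev_spec : Claim_equal_postena_delitev := by
  intro s _
  unfold Spec_postena_delitev postena_delitev postena_delitev_alt
  have hz : s.foldl (fun z i => PySem.Set.add z i) PySem.Set.empty = PySem.Set.ofList s := by
    rw [PySem.Set.ofList_eq_foldl]; rfl
  simp only [hz]
  rw [PySem.List.foldl_append_if_eq_filter, List.nil_append,
    razdA_eq_comps ((PySem.Set.ofList s).length + 1) (by omega) s,
    dfsB_eq ((PySem.Set.ofList s).length + 1) (by omega) s 1 [] PySem.Dict.empty (Or.inl rfl) PySem.Dict.nodup_keys_empty]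
  simp only [List.nil_append, List.map_id_fun', id]
  apply List.filter_congr
  intro c hc
  exact jePostena_eq c s (comps_flatten _ s c hc)
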